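-- pv_equiv track=rewrite | github.com/BenPalmer1983/eampa_v3 | examples/bb1/wd/20201023_062330/input/eampa.py | fields
-- ===== SOURCE A (Python) =====
-- def fields(input_string):
--   input_string = input_string.strip()
--   output_string = ""
--   last = None
--   for character in input_string:
--     if(character != " " or (character == " " and last != " ")):
--       output_string += character
--   return output_string.split(" ")
-- ===== SOURCE B (Python) =====
-- def fields(input_string):
--   tokens = []
--   cur = []
--   for ch in input_string.strip():
--     if ch == " ":
--       tokens.append("".join(cur))
--       cur = []
--     else:
--       cur.append(ch)
--   tokens.append("".join(cur))
--   return tokens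
-- ===== Notes on version B (the rewrite author's own statement) =====
-- stated objective: alternative
-- what changed: A copies characters through a dead de-duplication guard (its 'last' variable is never updated, so every character is kept) into a new string and then calls the library single-space split; B is a single-pass tokenizer over the stripped string that builds the token list directly, with no intermediate string and no library split.
import Mathlib
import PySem

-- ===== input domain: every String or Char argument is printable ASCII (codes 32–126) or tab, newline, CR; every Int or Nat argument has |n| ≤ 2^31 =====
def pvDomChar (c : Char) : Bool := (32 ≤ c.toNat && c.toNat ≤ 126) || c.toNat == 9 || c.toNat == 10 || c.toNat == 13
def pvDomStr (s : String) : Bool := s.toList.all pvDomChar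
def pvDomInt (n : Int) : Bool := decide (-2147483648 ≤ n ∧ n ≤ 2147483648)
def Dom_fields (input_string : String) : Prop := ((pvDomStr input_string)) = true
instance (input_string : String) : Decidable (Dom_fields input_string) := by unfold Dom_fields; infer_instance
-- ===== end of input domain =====

-- B replaces A's character-copy loop (whose 'last' de-duplication guard is dead: 'last' is
-- never reassigned) plus str.split(" ") by a single-pass tokenizer building the token list
-- directly; objective: alternative decomposition, same result on every input.

-- ===== PORT A =====
-- A: strip; copy characters guarded by the (dead) 'last' test into output_string; split on " ".
def fields (input_string : String) : List String :=
  let stripped := PySem.Chars.strip input_string.toList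
  let st := stripped.foldl
    (fun (st : List Char × Option Char) character =>
      if character ≠ ' ' ∨ (character = ' ' ∧ st.2 ≠ some ' ') then
        (st.1 ++ [character], st.2)
      else st)
    ([], (none : Option Char))
  (PySem.Chars.splitOn st.1 [' ']).map String.ofList

-- ===== PORT B =====
-- B: strip; one pass over the characters, appending finished tokens to the token list.
def fields_alt (input_string : String) : List String :=
  let st := (PySem.Chars.strip input_string.toList).foldl
    (fun (st : List (List Char) × List Char) ch =>
      if ch = ' ' then (st.1 ++ [st.2], []) else (st.1, st.2 ++ [ch]))
    ([], [])
  (st.1 ++ [st.2]).map String.ofList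

-- ===== PRECONDITION & SPEC =====
def Spec_fields (input_string : String) (out : List String) : Prop := out = fields_alt input_string
instance (input_string : String) (out : List String) : Decidable (Spec_fields input_string out) := by unfold Spec_fields; infer_instance

-- ===== CLAIM (what is proved, stated in full; the proofs are below) =====
def Claim_equal_fields : Prop := ∀ (input_string : String), Dom_fields input_string → Spec_fields input_string (fields input_string)

-- ===== LEMMAS AND PROOFS =====

-- reference tokenizer used only in the proofs
def pvTok (cur : List Char) : List Char → List (List Char)
  | [] => [cur]
  | c :: rest => if c = ' ' then cur :: pvTok [] rest else pvTok (cur ++ [c]) rest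

-- A's loop keeps every character: its 'last' component is never changed from none,
-- so the guard is always true.
theorem fields_fold (cs out : List Char) :
    cs.foldl
      (fun (st : List Char × Option Char) character =>
        if character ≠ ' ' ∨ (character = ' ' ∧ st.2 ≠ some ' ') then
          (st.1 ++ [character], st.2)
        else st)
      (out, (none : Option Char)) = (out ++ cs, none) := by
  induction cs generalizing out with
  | nil => simp [List.foldl]
  | cons c rest ih =>
    simp only [List.foldl]
    by_cases hc : c = ' ' <;> simp [hc, ih]

theorem splitOn_go_spec (fuel : Nat) :
    ∀ (l cur : List Char) (acc : List (List Char)), l.length ≤ fuel →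
      PySem.Chars.splitOn.go [' '] fuel l cur acc = acc.reverse ++ pvTok cur.reverse l := by
  induction fuel with
  | zero =>
    intro l cur acc h
    have : l = [] := List.eq_nil_of_length_eq_zero (Nat.le_zero.mp h)
    subst this
    simp [PySem.Chars.splitOn.go, pvTok]
  | succ n ih =>
    intro l cur acc h
    cases l with
    | nil => simp [PySem.Chars.splitOn.go, pvTok]
    | cons c rest =>
      by_cases hc : c = ' '
      · subst hc
        have hpre : [' '].isPrefixOf (' ' :: rest) = true := by
          simp [List.isPrefixOf]
        have h' : rest.length ≤ n := by simpa using Nat.le_of_succ_le_succ h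
        rw [PySem.Chars.splitOn.go]
        simp [hpre, ih rest [] ((cur.reverse) :: acc) h', pvTok]
      · have hpre : [' '].isPrefixOf (c :: rest) = false := by
          simp [List.isPrefixOf]
          exact fun hh => hc hh.symm
        have h' : rest.length ≤ n := by simpa using Nat.le_of_succ_le_succ h
        rw [PySem.Chars.splitOn.go]
        simp only [hpre, Bool.false_eq_true, if_false]
        rw [ih rest (c :: cur) acc h']
        simp [pvTok, hc]

theorem splitOn_single (cs : List Char) :
    PySem.Chars.splitOn cs [' '] = pvTok [] cs := by
  unfold PySem.Chars.splitOn
  rw [splitOn_go_spec (cs.length + 1) cs [] [] (Nat.le_succ _)]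
  simp

theorem fields_alt_fold (cs : List Char) (toks : List (List Char)) (cur : List Char) :
    (cs.foldl
        (fun (st : List (List Char) × List Char) ch =>
          if ch = ' ' then (st.1 ++ [st.2], []) else (st.1, st.2 ++ [ch]))
        (toks, cur)).1 ++
      [(cs.foldl
        (fun (st : List (List Char) × List Char) ch =>
          if ch = ' ' then (st.1 ++ [st.2], []) else (st.1, st.2 ++ [ch]))
        (toks, cur)).2] = toks ++ pvTok cur cs := by
  induction cs generalizing toks cur with
  | nil => simp [pvTok]
  | cons c rest ih =>
    by_cases hc : c = ' '
    · subst hc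
      simp only [List.foldl, pvTok] at *
      rw [ih]
      simp
    · simp only [List.foldl, pvTok, if_neg hc] at *
      rw [ih]

-- ===== VERDICT (by name: the statement is the Claim_ definition above) =====
theorem fields_spec : Claim_equal_fields := by
  intro s _
  unfold Spec_fields fields fields_alt
  simp only [fields_fold, splitOn_single]
  rw [fields_alt_fold]
  simp
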